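-- pv_equiv track=rewrite | github.com/Fedor-Lyanguzov/vpn-manager | archive/cidr4_merger.py | reduce_nodes
-- ===== SOURCE A (Python) =====
-- Node = tuple[int, int, int, int]
--
-- class Cidr4MergerError(Exception):
--     pass
--
-- def sort_nodes(nodes: list[Node]) -> list[Node]:
--     return sorted(nodes, key=lambda x: (x[1], x[0]))
--
-- def get_net_addr(ip: int, mask_len: int) -> int:
--     mask = ((1 << mask_len) - 1) << (32 - mask_len)
--     net_addr = ip & mask
--     return net_addr
--
-- def get_parent_ip(ip: int, mask_len: int) -> int:
--     if mask_len == 0: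
--         raise Cidr4MergerError("The top of the tree has no parent!")
--     return get_net_addr(ip, mask_len - 1)
--
-- def have_same_parent(mask_len_a, parent_ip_a, mask_len_b, parent_ip_b) -> bool:
--     return mask_len_a == mask_len_b and parent_ip_a == parent_ip_b
--
-- def get_group_with_max_mask_len(nodes: list[Node]) -> list[Node]:
--     max_mask_len = max(nodes, key=lambda x: x[1])[1]
--     return list(filter(lambda x: x[1] == max_mask_len, nodes))
--
-- def make_parent(a: Node, b: Node | None = None) -> Node:
--     ip_a, mask_len_a, added_ips_number_a, parent_ip_a = a
--     if b:
--         ip_b, mask_len_b, added_ips_b, parent_ip_b = b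
--         if not have_same_parent(mask_len_a, parent_ip_a, mask_len_b, parent_ip_b):
--             raise Cidr4MergerError("Nodes must be neighbors!")
--         added_ips_number = added_ips_number_a + added_ips_b
--     else:
--         added_ips_number = added_ips_number_a + 2 ** (32 - mask_len_a)
--     ip = parent_ip_a
--     mask_len = mask_len_a - 1
--     parent_ip = get_parent_ip(ip, mask_len)
--     return ip, mask_len, added_ips_number, parent_ip
--
-- def reduce_nodes(nodes: list[Node]) -> list[Node]:
--     group = get_group_with_max_mask_len(nodes)
--
--     neighbours = []
--     loners = []
--     i = 0
--     while i < len(group) - 1: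
--         a, b = group[i], group[i + 1]
--         ip_a, mask_len_a, _, parent_ip_a = a
--         ip_b, mask_len_b, _, parent_ip_b = b
--         if have_same_parent(mask_len_a, parent_ip_a, mask_len_b, parent_ip_b):
--             neighbours.append((a, b))
--             i += 2
--         else:
--             loners.append(a)
--             i += 1
--     if i == len(group) - 1:
--         loners.append(group[i])
--
--     if neighbours:
--         zipped = zip(neighbours, map(lambda x: make_parent(x[0], x[1]), neighbours))
--         min_zipped = min(zipped, key=lambda x: x[1][2])
--         (a, b), parent = min_zipped
--         nodes.remove(a)
--         nodes.remove(b)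
--         nodes.append(parent)
--     elif loners:
--         zipped = zip(loners, map(make_parent, loners))
--         min_zipped = min(zipped, key=lambda x: x[1][2])
--         a, parent = min_zipped
--         nodes.remove(a)
--         nodes.append(parent)
--     else:
--         assert False, "Error"
--
--     return sort_nodes(nodes)
-- ===== SOURCE B (Python) =====
-- # Same module helpers; reduce_nodes is re-decomposed: maximal equal-parent runs
-- # (same-parent is an equivalence, so adjacency groups into runs), each run chunked
-- # recursively into disjoint pairs + an odd leftover loner; the winner is chosen by
-- # an arithmetic key and make_parent is applied only once, to the winner.
-- Node = tuple[int, int, int, int]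
--
-- class Cidr4MergerError(Exception):
--     pass
--
-- def sort_nodes(nodes: list[Node]) -> list[Node]:
--     return sorted(nodes, key=lambda x: (x[1], x[0]))
--
-- def get_net_addr(ip: int, mask_len: int) -> int:
--     mask = ((1 << mask_len) - 1) << (32 - mask_len)
--     net_addr = ip & mask
--     return net_addr
--
-- def get_parent_ip(ip: int, mask_len: int) -> int:
--     if mask_len == 0:
--         raise Cidr4MergerError("The top of the tree has no parent!")
--     return get_net_addr(ip, mask_len - 1)
--
-- def have_same_parent(mask_len_a, parent_ip_a, mask_len_b, parent_ip_b) -> bool: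
--     return mask_len_a == mask_len_b and parent_ip_a == parent_ip_b
--
-- def get_group_with_max_mask_len(nodes: list[Node]) -> list[Node]:
--     max_mask_len = max(nodes, key=lambda x: x[1])[1]
--     return list(filter(lambda x: x[1] == max_mask_len, nodes))
--
-- def make_parent(a: Node, b: Node | None = None) -> Node:
--     ip_a, mask_len_a, added_ips_number_a, parent_ip_a = a
--     if b:
--         ip_b, mask_len_b, added_ips_b, parent_ip_b = b
--         if not have_same_parent(mask_len_a, parent_ip_a, mask_len_b, parent_ip_b):
--             raise Cidr4MergerError("Nodes must be neighbors!")
--         added_ips_number = added_ips_number_a + added_ips_b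
--     else:
--         added_ips_number = added_ips_number_a + 2 ** (32 - mask_len_a)
--     ip = parent_ip_a
--     mask_len = mask_len_a - 1
--     parent_ip = get_parent_ip(ip, mask_len)
--     return ip, mask_len, added_ips_number, parent_ip
--
-- def _runs(group: list[Node]) -> list[list[Node]]:
--     # maximal runs of consecutive nodes sharing (mask_len, parent_ip), built back-to-front
--     if not group:
--         return []
--     x = group[0]
--     rest = _runs(group[1:])
--     if rest and rest[0] and have_same_parent(x[1], x[3], rest[0][0][1], rest[0][0][3]):
--         return [[x] + rest[0]] + rest[1:]
--     return [[x]] + rest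
--
-- def _chunk(r: list[Node]) -> tuple[list[tuple[Node, Node]], list[Node]]:
--     # disjoint adjacent pairs of a run; the odd leftover element is a loner
--     if len(r) >= 2:
--         ps, ln = _chunk(r[2:])
--         return [(r[0], r[1])] + ps, ln
--     if r:
--         return [], [r[0]]
--     return [], []
--
-- def reduce_nodes(nodes: list[Node]) -> list[Node]:
--     group = get_group_with_max_mask_len(nodes)
--     pairs: list[tuple[Node, Node]] = []
--     loners: list[Node] = []
--     for r in _runs(group):
--         ps, ln = _chunk(r)
--         pairs += ps
--         loners += ln
--     if pairs:
--         a, b = min(pairs, key=lambda p: p[0][2] + p[1][2])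
--         nodes.remove(a)
--         nodes.remove(b)
--         nodes.append(make_parent(a, b))
--     elif loners:
--         a = min(loners, key=lambda x: x[2] + 2 ** (32 - x[1]))
--         nodes.remove(a)
--         nodes.append(make_parent(a))
--     else:
--         assert False, "Error"
--     return sort_nodes(nodes)
-- ===== Notes on version B (the rewrite author's own statement) =====
-- stated objective: alternative
-- what changed: reduce_nodes is re-decomposed: instead of A's index-stepping scan (i += 2 / i += 1) that builds neighbour/loner candidate lists and maps make_parent over every candidate before taking min, B splits the max-mask group into maximal runs of equal (mask, parent) (same-parent is an equivalence, so the greedy scan's pairing is exactly per-run chunking), chunks each run recursively into disjoint adjacent pairs plus an odd-length leftover loner, selects the winner by a direct arithmetic key (sum of added-ips for pairs, added + 2**(32-mask) for loners), and constructs a parent node only once, for the …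
-- outside the precondition, e.g. on reduce_nodes([(0, 33, 5, 0)]): A returns [(0, 32, 5.5, 0)], B returns [(0, 32, 5.5, 0)]; on reduce_nodes([(0, 33, 0, 0), (1, 33, 0, 0)]): A returns [(0, 32, 0, 0)], B returns [(0, 32, 0, 0)]
import Mathlib
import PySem

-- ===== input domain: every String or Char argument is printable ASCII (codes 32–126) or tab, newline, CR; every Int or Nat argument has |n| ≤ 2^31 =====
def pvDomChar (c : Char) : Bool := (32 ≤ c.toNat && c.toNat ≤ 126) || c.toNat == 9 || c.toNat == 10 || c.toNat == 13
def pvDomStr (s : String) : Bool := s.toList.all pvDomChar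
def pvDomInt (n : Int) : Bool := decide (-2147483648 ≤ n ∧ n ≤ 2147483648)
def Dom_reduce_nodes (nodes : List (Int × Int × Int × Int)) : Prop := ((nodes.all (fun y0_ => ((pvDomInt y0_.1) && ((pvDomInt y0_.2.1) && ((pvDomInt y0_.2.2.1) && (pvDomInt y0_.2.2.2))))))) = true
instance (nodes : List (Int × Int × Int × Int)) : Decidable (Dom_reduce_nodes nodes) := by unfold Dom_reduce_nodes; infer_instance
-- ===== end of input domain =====

-- B re-decomposes reduce_nodes: maximal equal-parent runs chunked into pairs + leftover loner,
-- selection by an arithmetic key, make_parent applied only to the winner (alternative, same cost).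
-- Both versions mutate the Python list `nodes` (remove/append) identically; the theorems are about the return value.


-- ===== PORT A =====
-- shared module helpers (identical in A and B, as in the Python source)

-- sorted(nodes, key=lambda x: (x[1], x[0]))
def pv_sort_nodes (ns : List (Int × Int × Int × Int)) : List (Int × Int × Int × Int) :=
  PySem.List.sorted2 ns (fun x => x.2.1) (fun x => x.1)

-- exact for 0 ≤ mask_len ≤ 32 (Pre_ keeps every computed mask length there; Python raises on a negative shift)
def pv_get_net_addr (ip mask_len : Int) : Int :=
  PySem.Int.band ip ((((1 : Int) <<< mask_len.toNat) - 1) <<< ((32 : Int) - mask_len).toNat)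

-- the mask_len == 0 raise is excluded by Pre_ (every mask length reaching here is ≥ 1)
def pv_get_parent_ip (ip mask_len : Int) : Int :=
  pv_get_net_addr ip (mask_len - 1)

def pv_have_same_parent (mask_len_a parent_ip_a mask_len_b parent_ip_b : Int) : Bool :=
  mask_len_a == mask_len_b && parent_ip_a == parent_ip_b

-- max(nodes, key=…) raises ValueError on []; excluded by Pre_
def pv_get_group (nodes : List (Int × Int × Int × Int)) : List (Int × Int × Int × Int) :=
  match PySem.List.max? nodes (fun x => x.2.1) with
  | some m => nodes.filter (fun x => x.2.1 == m.2.1)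
  | none => []

-- the 'Nodes must be neighbors!' raise is unreachable (have_same_parent is checked before every call
-- with a second node); 2 ** (32 - mask) is exact for mask ≤ 32 (Pre_)
def pv_make_parent (a : Int × Int × Int × Int) (b : Option (Int × Int × Int × Int)) : Int × Int × Int × Int :=
  let added :=
    match b with
    | some bb => a.2.2.1 + bb.2.2.1
    | none => a.2.2.1 + (2 : Int) ^ ((32 : Int) - a.2.1).toNat
  (a.2.2.2, a.2.1 - 1, added, pv_get_parent_ip a.2.2.2 (a.2.1 - 1))

-- A's index loop over the group, building the neighbours and loners lists
def pv_scanA : List (Int × Int × Int × Int) →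
    List ((Int × Int × Int × Int) × (Int × Int × Int × Int)) × List (Int × Int × Int × Int)
  | a :: b :: rest =>
    if pv_have_same_parent a.2.1 a.2.2.2 b.2.1 b.2.2.2 then
      let r := pv_scanA rest
      ((a, b) :: r.1, r.2)
    else
      let r := pv_scanA (b :: rest)
      (r.1, a :: r.2)
  | [a] => ([], [a])
  | [] => ([], [])
  termination_by g => g.length
  decreasing_by all_goals simp

-- List.erase = Python list.remove here: the removed element comes from the group, a sublist of nodes
def reduce_nodes (nodes : List (Int × Int × Int × Int)) : List (Int × Int × Int × Int) :=
  let s := pv_scanA (pv_get_group nodes)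
  if s.1 ≠ [] then
    match PySem.List.min? (s.1.map (fun p => (p, pv_make_parent p.1 (some p.2)))) (fun c => c.2.2.2.1) with
    | some c => pv_sort_nodes (((nodes.erase c.1.1).erase c.1.2) ++ [c.2])
    | none => nodes   -- unreachable: min of a nonempty list
  else if s.2 ≠ [] then
    match PySem.List.min? (s.2.map (fun a => (a, pv_make_parent a none))) (fun c => c.2.2.2.1) with
    | some c => pv_sort_nodes ((nodes.erase c.1) ++ [c.2])
    | none => nodes   -- unreachable
  else nodes          -- Python: assert False (unreachable: the group is nonempty under Pre_)

-- ===== PORT B =====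
-- Source B's _runs: maximal runs of consecutive nodes sharing (mask_len, parent_ip), built back-to-front
def pv_runs : List (Int × Int × Int × Int) → List (List (Int × Int × Int × Int))
  | [] => []
  | x :: xs =>
    match pv_runs xs with
    | (y :: ys) :: rs =>
      if pv_have_same_parent x.2.1 x.2.2.2 y.2.1 y.2.2.2 then (x :: y :: ys) :: rs
      else [x] :: (y :: ys) :: rs
    | rest => [x] :: rest   -- rest = [] (an empty run never occurs; Python checks `rest and rest[0]`)

-- Source B's _chunk: disjoint adjacent pairs of a run; the odd leftover element is a loner
def pv_chunk : List (Int × Int × Int × Int) →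
    List ((Int × Int × Int × Int) × (Int × Int × Int × Int)) × List (Int × Int × Int × Int)
  | a :: b :: rest => let r := pv_chunk rest; ((a, b) :: r.1, r.2)
  | [a] => ([], [a])
  | [] => ([], [])

def reduce_nodes_alt (nodes : List (Int × Int × Int × Int)) : List (Int × Int × Int × Int) :=
  let group := pv_get_group nodes
  -- the accumulation loop `pairs += ps; loners += ln`
  let pl := (pv_runs group).foldl
    (fun acc r => let c := pv_chunk r; (acc.1 ++ c.1, acc.2 ++ c.2)) ([], [])
  if pl.1 ≠ [] then
    match PySem.List.min? pl.1 (fun p => p.1.2.2.1 + p.2.2.2.1) with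
    | some p => pv_sort_nodes (((nodes.erase p.1).erase p.2) ++ [pv_make_parent p.1 (some p.2)])
    | none => nodes   -- unreachable
  else if pl.2 ≠ [] then
    match PySem.List.min? pl.2 (fun x => x.2.2.1 + (2 : Int) ^ ((32 : Int) - x.2.1).toNat) with
    | some a => pv_sort_nodes ((nodes.erase a) ++ [pv_make_parent a none])
    | none => nodes   -- unreachable
  else nodes          -- Python: assert False

-- ===== PRECONDITION & SPEC =====
-- Pre_ excludes the empty list (max raises ValueError) and inputs whose maximal mask length lies outside
-- [2, 32], where the Python parent computations raise (Cidr4MergerError at mask 1, ValueError on a negative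
-- shift) or produce floats via 2 ** (32 - mask); on masks 33-34 whose group starts with an adjacent pair A
-- still returns an int value, which B matches (see cites).
def Pre_reduce_nodes (nodes : List (Int × Int × Int × Int)) : Prop :=
  (∃ x ∈ nodes, 2 ≤ x.2.1) ∧ (∀ x ∈ nodes, x.2.1 ≤ 32)
instance (nodes : List (Int × Int × Int × Int)) : Decidable (Pre_reduce_nodes nodes) := by
  unfold Pre_reduce_nodes; infer_instance

def pvWitness_reduce_nodes : (List (Int × Int × Int × Int)) := [(0, 24, 0, 0)]

def Spec_reduce_nodes (nodes : List (Int × Int × Int × Int)) (out : List (Int × Int × Int × Int)) : Prop := out = reduce_nodes_alt nodes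
instance (nodes : List (Int × Int × Int × Int)) (out : List (Int × Int × Int × Int)) : Decidable (Spec_reduce_nodes nodes out) := by unfold Spec_reduce_nodes; infer_instance

-- ===== CLAIM (what is proved, stated in full; the proofs are below) =====
def Claim_equal_reduce_nodes : Prop := ∀ (nodes : List (Int × Int × Int × Int)), Dom_reduce_nodes nodes → Pre_reduce_nodes nodes → Spec_reduce_nodes nodes (reduce_nodes nodes)

-- ===== LEMMAS AND PROOFS =====

-- one-step unfolding of pv_runs on a cons
theorem pv_runs_cons (x : Int × Int × Int × Int) (xs : List (Int × Int × Int × Int)) :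
    pv_runs (x :: xs) = (match pv_runs xs with
      | (y :: ys) :: rs =>
        if pv_have_same_parent x.2.1 x.2.2.2 y.2.1 y.2.2.2 then (x :: y :: ys) :: rs
        else [x] :: (y :: ys) :: rs
      | rest => [x] :: rest) := rfl

-- the foldl accumulating (pairs, loners) is the pair of flatMaps over the runs
theorem foldl_chunk (rs : List (List (Int × Int × Int × Int)))
    (p : List ((Int × Int × Int × Int) × (Int × Int × Int × Int))) (l : List (Int × Int × Int × Int)) :
    rs.foldl (fun acc r => (acc.1 ++ (pv_chunk r).1, acc.2 ++ (pv_chunk r).2)) (p, l)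
      = (p ++ rs.flatMap (fun r => (pv_chunk r).1), l ++ rs.flatMap (fun r => (pv_chunk r).2)) := by
  induction rs generalizing p l with
  | nil => simp
  | cons r rs ih => simp [List.foldl_cons, ih]

-- min? over a mapped list is min? with the composed key
theorem min?_map {α β : Type} (f : α → β) (k : β → Int) (l : List α) (acc : Option α) :
    List.foldl (fun acc x => match acc with
      | none => some x
      | some m => if k x < k m then some x else some m) (acc.map f) (l.map f)
    = Option.map f (List.foldl (fun acc x => match acc with
      | none => some x
      | some m => if k (f x) < k (f m) then some x else some m) acc l) := by
  induction l generalizing acc with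
  | nil => simp
  | cons a t ih =>
    have h : (match acc.map f with
        | none => some (f a)
        | some m => if k (f a) < k m then some (f a) else some m)
        = Option.map f (match acc with
        | none => some a
        | some m => if k (f a) < k (f m) then some a else some m) := by
      cases acc with
      | none => rfl
      | some m => by_cases h : k (f a) < k (f m) <;> simp [h]
    simp only [List.map_cons, List.foldl_cons, h, ih]

theorem min?_map' {α β : Type} (f : α → β) (k : β → Int) (l : List α) :
    PySem.List.min? (l.map f) k = Option.map f (PySem.List.min? l (fun x => k (f x))) := by
  unfold PySem.List.min?
  exact min?_map f k l none

-- A's greedy index scan equals the run/chunk decomposition: within a run of equal (mask, parent)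
-- the scan pairs disjoint adjacent elements and leaves the odd leftover as a loner
theorem scanA_eq_runs (g : List (Int × Int × Int × Int)) :
    pv_scanA g = ((pv_runs g).flatMap (fun r => (pv_chunk r).1),
                  (pv_runs g).flatMap (fun r => (pv_chunk r).2)) := by
  induction g using pv_scanA.induct with
  | case1 a b rest hsame ih =>
    rw [pv_scanA]
    simp only [hsame, if_true]
    rw [pv_runs_cons a, pv_runs_cons b]
    cases hr : pv_runs rest with
    | nil => rw [hr] at ih; simp [hsame, pv_chunk, ih]
    | cons r rs =>
      cases r with
      | nil => rw [hr] at ih; simp [hsame, pv_chunk, ih]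
      | cons y ys =>
        rw [hr] at ih
        by_cases hby : pv_have_same_parent b.2.1 b.2.2.2 y.2.1 y.2.2.2
        · simp only [hby, if_true]
          simp [hsame, pv_chunk, ih]
        · simp only [hby, if_false, Bool.false_eq_true]
          simp [hsame, pv_chunk, ih]
  | case2 a b rest hsame ih =>
    rw [pv_scanA]
    rw [pv_runs_cons b] at ih
    rw [pv_runs_cons a, pv_runs_cons b]
    cases hr : pv_runs rest with
    | nil => simp only [hr] at ih ⊢; simp [hsame, pv_chunk, ih]
    | cons r rs =>
      cases r with
      | nil => simp only [hr] at ih ⊢; simp [hsame, pv_chunk, ih]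
      | cons y ys =>
        simp only [hr] at ih ⊢
        by_cases hby : pv_have_same_parent b.2.1 b.2.2.2 y.2.1 y.2.2.2
        · simp only [hby, if_true] at ih ⊢
          simp [hsame, pv_chunk, ih]
        · simp only [hby, if_false, Bool.false_eq_true] at ih ⊢
          simp [hsame, pv_chunk, ih]
  | case3 a => simp [pv_scanA, pv_runs, pv_chunk]
  | case4 => simp [pv_scanA, pv_runs]

theorem min?_pairs (l : List ((Int × Int × Int × Int) × (Int × Int × Int × Int))) :
    PySem.List.min? (l.map (fun p => (p, pv_make_parent p.1 (some p.2)))) (fun c => c.2.2.2.1)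
      = Option.map (fun p => (p, pv_make_parent p.1 (some p.2)))
          (PySem.List.min? l (fun p => p.1.2.2.1 + p.2.2.2.1)) := by
  rw [min?_map']
  simp [pv_make_parent]

theorem min?_loners (l : List (Int × Int × Int × Int)) :
    PySem.List.min? (l.map (fun a => (a, pv_make_parent a none))) (fun c => c.2.2.2.1)
      = Option.map (fun a => (a, pv_make_parent a none))
          (PySem.List.min? l (fun x => x.2.2.1 + (2 : Int) ^ ((32 : Int) - x.2.1).toNat)) := by
  rw [min?_map']
  simp [pv_make_parent]

theorem reduce_eq (nodes : List (Int × Int × Int × Int)) :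
    reduce_nodes nodes = reduce_nodes_alt nodes := by
  unfold reduce_nodes reduce_nodes_alt
  simp only [scanA_eq_runs, foldl_chunk, List.nil_append, min?_pairs, min?_loners]
  cases hp : PySem.List.min? ((pv_runs (pv_get_group nodes)).flatMap (fun r => (pv_chunk r).1))
      (fun p => p.1.2.2.1 + p.2.2.2.1) with
  | some p =>
    have hne : (pv_runs (pv_get_group nodes)).flatMap (fun r => (pv_chunk r).1) ≠ [] := by
      intro h; rw [h] at hp; simp [PySem.List.min?] at hp
    simp [hne]
  | none =>
    have he : (pv_runs (pv_get_group nodes)).flatMap (fun r => (pv_chunk r).1) = [] :=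
      (PySem.List.min?_eq_none_iff _ _).mp hp
    simp only [he]
    cases hl : PySem.List.min? ((pv_runs (pv_get_group nodes)).flatMap (fun r => (pv_chunk r).2))
        (fun x => x.2.2.1 + (2 : Int) ^ ((32 : Int) - x.2.1).toNat) with
    | some a =>
      have hne : (pv_runs (pv_get_group nodes)).flatMap (fun r => (pv_chunk r).2) ≠ [] := by
        intro h; rw [h] at hl; simp [PySem.List.min?] at hl
      simp [hne]
    | none =>
      have he2 : (pv_runs (pv_get_group nodes)).flatMap (fun r => (pv_chunk r).2) = [] :=
        (PySem.List.min?_eq_none_iff _ _).mp hl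
      simp [he2]

-- ===== VERDICT (by name: the statement is the Claim_ definition above) =====
theorem reduce_nodes_spec : Claim_equal_reduce_nodes := by
  intro nodes _ _
  unfold Spec_reduce_nodes
  exact reduce_eq nodes
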